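-- pv_equiv track=rewrite | github.com/junho-one/algorithm | programmers/None/bestSet.py | solution
-- ===== SOURCE A (Python) =====
-- def solution(n, s):
--     if n == 1:
--         return [s]
--
--     if s < n:
--         return [-1]
--
--     answer = []
--     while n > 0:
--         val = s // n
--         rem = s % n
--
--         if rem != 0:
--             val += 1
--
--         answer.append(val)
--         s -= val
--         n -= 1
--
--     answer.sort()
--
--     return answer
-- ===== SOURCE B (Python) =====
-- def solution(n, s):
--     if n == 1:
--         return [s]
--     if s < n:
--         return [-1]
--     if n <= 0:
--         return []
--     q, r = divmod(s, n)
--     return [q] * (n - r) + [q + 1] * r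
-- ===== Notes on version B (the rewrite author's own statement) =====
-- stated objective: faster
-- what changed: Replaced the ceil-divide-subtract loop followed by a sort with the direct closed form [s//n]*(n-(s%n)) + [s//n+1]*(s%n), plus the same n==1 / s<n / n<=0 guards.
import Mathlib
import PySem

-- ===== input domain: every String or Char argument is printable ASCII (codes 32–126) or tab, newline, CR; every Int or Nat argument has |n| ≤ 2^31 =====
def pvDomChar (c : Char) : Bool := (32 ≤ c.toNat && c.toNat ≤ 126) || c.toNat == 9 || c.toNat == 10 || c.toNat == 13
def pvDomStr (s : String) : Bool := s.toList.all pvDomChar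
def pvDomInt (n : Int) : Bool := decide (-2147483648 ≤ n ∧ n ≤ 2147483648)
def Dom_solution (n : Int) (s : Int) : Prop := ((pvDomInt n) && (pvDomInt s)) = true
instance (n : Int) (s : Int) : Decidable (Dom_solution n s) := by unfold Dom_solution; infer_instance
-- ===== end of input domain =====

-- B replaces A's O(n log n) ceil-divide-subtract loop plus sort by the closed form
-- [s//n]*(n-r) ++ [s//n+1]*r with r = s%n (O(n) output construction, no sort).

-- ===== PORT A =====
-- the 'while n > 0' loop of A: val = ceil-ish s//n (+1 if remainder), append, s -= val, n -= 1
def solutionLoop (n : Int) (s : Int) (answer : List Int) : List Int :=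
  if _h : n > 0 then
    let val := PySem.Int.floordiv s n
    let rem := PySem.Int.mod s n
    let val := if rem ≠ 0 then val + 1 else val
    solutionLoop (n - 1) (s - val) (answer ++ [val])
  else answer
termination_by n.toNat
decreasing_by omega

def solution (n : Int) (s : Int) : List Int :=
  if n = 1 then [s]
  else if s < n then [-1]
  else PySem.List.sorted (solutionLoop n s []) (fun x => x) false

-- ===== PORT B =====
def solution_alt (n : Int) (s : Int) : List Int :=
  if n = 1 then [s]
  else if s < n then [-1]
  else if n ≤ 0 then []
  else
    let q := PySem.Int.floordiv s n
    let r := PySem.Int.mod s n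
    List.replicate (n - r).toNat q ++ List.replicate r.toNat (q + 1)

-- ===== PRECONDITION & SPEC =====
def Spec_solution (n : Int) (s : Int) (out : List Int) : Prop := out = solution_alt n s
instance (n : Int) (s : Int) (out : List Int) : Decidable (Spec_solution n s out) := by unfold Spec_solution; infer_instance

-- ===== CLAIM (what is proved, stated in full; the proofs are below) =====
def Claim_equal_solution : Prop := ∀ (n : Int) (s : Int), Dom_solution n s → Spec_solution n s (solution n s)

-- ===== LEMMAS AND PROOFS =====

theorem solutionLoop_closed (k : Nat) : ∀ (n s : Int) (acc : List Int), 0 < n → n.toNat = k →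
    solutionLoop n s acc =
      acc ++ List.replicate (PySem.Int.mod s n).toNat (PySem.Int.floordiv s n + 1)
          ++ List.replicate (n - PySem.Int.mod s n).toNat (PySem.Int.floordiv s n) := by
  induction k with
  | zero => intro n s acc hn hk; omega
  | succ k ih =>
    intro n s acc hn hk
    rw [solutionLoop]
    simp only [hn, dif_pos]
    have hq : PySem.Int.floordiv s n = s / n := PySem.Int.floordiv_eq_ediv_of_pos hn
    have hr : PySem.Int.mod s n = s % n := PySem.Int.mod_eq_emod_of_pos hn
    have hdm : n * (s / n) + s % n = s := Int.mul_ediv_add_emod s n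
    have hr0 : 0 ≤ s % n := Int.emod_nonneg s (by omega)
    have hrn : s % n < n := Int.emod_lt_of_pos s hn
    by_cases hz : s % n = 0
    · -- remainder 0: val = s / n
      simp only [hq, hr, hz, ne_eq, not_true_eq_false, if_false]
      by_cases h1 : n = 1
      · subst h1
        rw [solutionLoop]
        simp only [show ¬((1:Int) - 1 > 0) by omega, dif_neg, not_false_iff]
        simp
      · have hn1 : 0 < n - 1 := by omega
        have hsform : s - s / n = 0 + (n - 1) * (s / n) := by
          rw [hz] at hdm; linear_combination -hdm
        have hq' : (s - s / n) / (n - 1) = s / n := by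
          rw [hsform, Int.add_mul_ediv_left _ _ (by omega : n - 1 ≠ 0),
            Int.zero_ediv, zero_add]
        have hr' : (s - s / n) % (n - 1) = 0 := by
          rw [hsform, Int.add_mul_emod_self_left, Int.zero_emod]
        rw [ih (n - 1) (s - s / n) _ hn1 (by omega)]
        rw [PySem.Int.floordiv_eq_ediv_of_pos hn1, PySem.Int.mod_eq_emod_of_pos hn1,
          hq', hr']
        simp only [Int.toNat_zero, List.replicate_zero, List.append_nil]
        have hrep : (n - 0).toNat = (n - 1 - 0).toNat + 1 := by omega
        rw [hrep, List.replicate_succ]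
        simp
    · -- remainder ≠ 0: val = s / n + 1
      simp only [hq, hr, hz, ne_eq, not_false_eq_true, if_true]
      have hn2 : 1 < n := by
        by_contra h
        have : n = 1 := by omega
        subst this; simp at hz
      have hn1 : 0 < n - 1 := by omega
      have hsform : s - (s / n + 1) = (s % n - 1) + (n - 1) * (s / n) := by
        linear_combination -hdm
      have hrb : 0 ≤ s % n - 1 ∧ s % n - 1 < n - 1 := by omega
      have hq' : (s - (s / n + 1)) / (n - 1) = s / n := by
        rw [hsform, Int.add_mul_ediv_left _ _ (by omega : n - 1 ≠ 0),
          Int.ediv_eq_zero_of_lt hrb.1 hrb.2, zero_add]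
      have hr' : (s - (s / n + 1)) % (n - 1) = s % n - 1 := by
        rw [hsform, Int.add_mul_emod_self_left, Int.emod_eq_of_lt hrb.1 hrb.2]
      rw [ih (n - 1) (s - (s / n + 1)) _ hn1 (by omega)]
      rw [PySem.Int.floordiv_eq_ediv_of_pos hn1, PySem.Int.mod_eq_emod_of_pos hn1, hq', hr']
      have hc1 : (n - 1 - (s % n - 1)).toNat = (n - s % n).toNat := by omega
      have hc2 : (s % n).toNat = (s % n - 1).toNat + 1 := by omega
      rw [hc1, hc2, List.replicate_succ]
      simp [List.append_assoc]

theorem solution_spec : Claim_equal_solution := by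
  intro n s _
  unfold Spec_solution solution solution_alt
  by_cases h1 : n = 1
  · simp [h1]
  · simp only [h1, if_false]
    by_cases h2 : s < n
    · simp [h2]
    · simp only [h2, if_false]
      by_cases h3 : n ≤ 0
      · -- loop body never runs; sorted [] = []
        rw [solutionLoop]
        simp [show ¬(n > 0) by omega, h3, PySem.List.sorted]
      · simp only [h3, if_false]
        have hn : 0 < n := by omega
        rw [solutionLoop_closed n.toNat n s [] hn rfl]
        simp only [List.nil_append]
        apply PySem.List.sorted_id_eq_of_perm_of_pairwise
        · exact List.perm_append_comm
        · have hq := PySem.Int.floordiv_eq_ediv_of_pos (a := s) hn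
          refine List.pairwise_append.mpr ⟨?_, ?_, ?_⟩
          · exact List.pairwise_replicate.mpr (Or.inr le_rfl)
          · exact List.pairwise_replicate.mpr (Or.inr le_rfl)
          · intro a ha b hb
            rw [List.eq_of_mem_replicate ha, List.eq_of_mem_replicate hb]
            omega
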